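-- pv_equiv track=rewrite | github.com/test4chacha/snacks | pyTetris.py | get_pos_list
-- ===== SOURCE A (Python) =====
-- def get_pos_list(patten):
--     """
--     返回点的坐标
--     :param patten ： 用1和0表示的方块图案
--     """
--     posList = []
--     x = 1
--     y = 1
--     for s in patten:
--         if s == '1':
--             posList.append((x, y))
--         if s == '\n':
--             y += 1
--             x = 0
--         x += 1
--     return posList
-- ===== SOURCE B (Python) =====
-- def get_pos_list(patten):
--     posList = []
--     for row, line in enumerate(patten.split('\n'), 1):
--         for col, ch in enumerate(line, 1):
--             if ch == '1':
--                 posList.append((col, row))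
--     return posList
-- ===== Notes on version B (the rewrite author's own statement) =====
-- stated objective: idiomatic
-- what changed: Replaces the single flat character scan with manual x-reset/y-increment bookkeeping by splitting the pattern into lines first and using two nested enumerate(..., 1) loops over lines and characters.
import Mathlib
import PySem

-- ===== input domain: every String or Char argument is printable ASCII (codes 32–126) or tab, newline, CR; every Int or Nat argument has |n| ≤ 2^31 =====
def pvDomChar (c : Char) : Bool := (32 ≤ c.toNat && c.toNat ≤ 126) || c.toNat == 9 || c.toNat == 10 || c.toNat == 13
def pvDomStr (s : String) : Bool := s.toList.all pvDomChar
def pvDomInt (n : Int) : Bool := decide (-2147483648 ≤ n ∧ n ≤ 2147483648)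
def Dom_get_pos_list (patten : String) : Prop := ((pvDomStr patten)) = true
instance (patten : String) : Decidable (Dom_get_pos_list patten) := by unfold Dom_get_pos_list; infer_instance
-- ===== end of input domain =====

-- B replaces A's flat character scan with manual column/row bookkeeping by a
-- split-into-lines pass followed by two nested 1-based enumerate loops (idiomatic; same cost).


-- ===== PORT A =====
-- the flat scan: for s in patten, with posList/x/y as loop state (appends; x resets after '\n')
def getPosListAux : List Char → List (Int × Int) → Int → Int → List (Int × Int)
  | [], acc, _, _ => acc
  | c :: cs, acc, x, y =>
    let acc' := if c = '1' then acc ++ [(x, y)] else acc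
    let y' := if c = '\n' then y + 1 else y
    let x' := if c = '\n' then (0 : Int) else x
    getPosListAux cs acc' (x' + 1) y'

def get_pos_list (patten : String) : List (Int × Int) :=
  getPosListAux patten.toList [] 1 1

-- ===== PORT B =====
-- inner loop: for col, ch in enumerate(line, 1)
def getPosLineFold (line : List Char) (row : Int) (acc : List (Int × Int)) : List (Int × Int) :=
  (PySem.List.enumerate line 1).foldl
    (fun a p => if p.2 = '1' then a ++ [(p.1, row)] else a) acc

-- outer loop: for row, line in enumerate(patten.split('\n'), 1)
def get_pos_list_alt (patten : String) : List (Int × Int) :=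
  (PySem.List.enumerate (patten.toList.splitOn '\n') 1).foldl
    (fun a p => getPosLineFold p.2 p.1 a) []

-- ===== PRECONDITION & SPEC =====
def Spec_get_pos_list (patten : String) (out : List (Int × Int)) : Prop := out = get_pos_list_alt patten
instance (patten : String) (out : List (Int × Int)) : Decidable (Spec_get_pos_list patten out) := by unfold Spec_get_pos_list; infer_instance

-- ===== CLAIM (what is proved, stated in full; the proofs are below) =====
def Claim_equal_get_pos_list : Prop := ∀ (patten : String), Dom_get_pos_list patten → Spec_get_pos_list patten (get_pos_list patten)

-- ===== LEMMAS AND PROOFS =====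

-- accumulator-free form of A's scan
def gScan : List Char → Int → Int → List (Int × Int)
  | [], _, _ => []
  | c :: cs, x, y =>
    if c = '1' then (x, y) :: gScan cs (x + 1) y
    else if c = '\n' then gScan cs 1 (y + 1)
    else gScan cs (x + 1) y

-- accumulator-free form of B's inner loop, with a starting column
def gLine : List Char → Int → Int → List (Int × Int)
  | [], _, _ => []
  | c :: cs, col, row =>
    if c = '1' then (col, row) :: gLine cs (col + 1) row else gLine cs (col + 1) row

-- accumulator-free form of B's outer loop
def gLines : List (List Char) → Int → List (Int × Int)
  | [], _ => []
  | l :: ls, row => gLine l 1 row ++ gLines ls (row + 1)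

theorem getPosListAux_eq (cs : List Char) :
    ∀ (acc : List (Int × Int)) (x y : Int),
      getPosListAux cs acc x y = acc ++ gScan cs x y := by
  induction cs with
  | nil => intro acc x y; simp [getPosListAux, gScan]
  | cons c cs ih =>
    intro acc x y
    by_cases h1 : c = '1'
    · have hn : ¬ c = '\n' := by subst h1; decide
      simp [getPosListAux, gScan, h1, ih]
    · by_cases hn : c = '\n'
      · simp [getPosListAux, gScan, hn, ih]
      · simp [getPosListAux, gScan, h1, hn, ih]

theorem getPosLineFold_eq (line : List Char) :
    ∀ (row : Int) (acc : List (Int × Int)) (col : Int),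
      (PySem.List.enumerate line col).foldl
          (fun a p => if p.2 = '1' then a ++ [(p.1, row)] else a) acc
        = acc ++ gLine line col row := by
  induction line with
  | nil => intro row acc col; simp [PySem.List.enumerate_nil, gLine]
  | cons c cs ih =>
    intro row acc col
    by_cases h1 : c = '1' <;>
      simp [PySem.List.enumerate_cons, gLine, h1, ih]

theorem outerFold_eq (ls : List (List Char)) :
    ∀ (acc : List (Int × Int)) (row : Int),
      (PySem.List.enumerate ls row).foldl (fun a p => getPosLineFold p.2 p.1 a) acc
        = acc ++ gLines ls row := by
  induction ls with
  | nil => intro acc row; simp [PySem.List.enumerate_nil, gLines]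
  | cons l ls ih =>
    intro acc row
    rw [PySem.List.enumerate_cons, List.foldl_cons, ih]
    show getPosLineFold l row acc ++ _ = _
    unfold getPosLineFold
    rw [getPosLineFold_eq]
    simp [gLines]

-- the core correspondence: A's scan, started at column x row y, produces the first
-- line of the '\n'-split with columns from x followed by the remaining lines line by line
theorem gScan_eq_split (cs : List Char) :
    ∀ (x y : Int) (l : List Char) (ls : List (List Char)),
      cs.splitOnP (· == '\n') = l :: ls →
      gScan cs x y = gLine l x y ++ gLines ls (y + 1) := by
  induction cs with
  | nil =>
    intro x y l ls h
    rw [List.splitOnP_nil] at h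
    cases h
    simp [gScan, gLine, gLines]
  | cons c cs ih =>
    intro x y l ls h
    by_cases hn : c = '\n'
    · subst hn
      rw [List.splitOnP_cons] at h
      simp only [beq_self_eq_true, if_true] at h
      cases h
      have h1 : ¬ ('\n' : Char) = '1' := by decide
      simp only [gScan, if_neg h1, gLine, List.nil_append]
      cases hs : cs.splitOnP (· == '\n') with
      | nil => exact absurd hs (List.splitOnP_ne_nil _ cs)
      | cons l' ls' => rw [ih 1 (y + 1) l' ls' hs]; simp [gLines]
    · rw [List.splitOnP_cons] at h
      simp only [beq_iff_eq, hn, if_false] at h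
      cases hs : cs.splitOnP (· == '\n') with
      | nil => exact absurd hs (List.splitOnP_ne_nil _ cs)
      | cons l' ls' =>
        rw [hs] at h
        simp only [List.modifyHead] at h
        injection h with hA hB
        subst hA
        subst hB
        rw [show gScan (c :: cs) x y
              = (if c = '1' then [(x, y)] else []) ++ gScan cs (x + 1) y by
            by_cases h1 : c = '1' <;> simp [gScan, h1, hn]]
        rw [ih (x + 1) y l' ls' hs]
        by_cases h1 : c = '1' <;> simp [gLine, h1]

-- ===== VERDICT (by name: the statement is the Claim_ definition above) =====
theorem get_pos_list_spec : Claim_equal_get_pos_list := by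
  intro patten _
  unfold Spec_get_pos_list get_pos_list get_pos_list_alt
  rw [getPosListAux_eq, outerFold_eq]
  have heq : patten.toList.splitOn '\n' = patten.toList.splitOnP (· == '\n') := rfl
  rw [heq]
  cases hs : patten.toList.splitOnP (· == '\n') with
  | nil => exact absurd hs (List.splitOnP_ne_nil _ _)
  | cons l ls => rw [gScan_eq_split patten.toList 1 1 l ls hs]; simp [gLines]
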